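-- pv_equiv track=rewrite | github.com/luisdibdin/advent-of-code | advent_of_code/day_three.py | get_digit_coordinates_by_row
-- ===== SOURCE A (Python) =====
-- from itertools import groupby
--
-- def group_indices_by_row(indices: list[tuple[int, int]]) -> dict[int, list[int]]:
--     return {
--         k: [*map(lambda v: v[1], values)]
--         for k, values in groupby(sorted(indices, key=lambda x: x[0]), lambda x: x[0])
--     }
--
-- def remove_consecutive_elements(integer_list: list[int]) -> list[int]:
--     new_list = [integer_list[0]] + [
--         integer_list[i + 1]
--         for i in range(len(integer_list) - 1)
--         if integer_list[i] + 1 != integer_list[i + 1]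
--     ]
--
--     return new_list
--
-- def get_digit_coordinates_by_row(
--     indicies: list[tuple[int, int]]
-- ) -> dict[int, list[int]]:
--     indices_by_row = group_indices_by_row(indicies)
--     simplified_indices = {
--         k: remove_consecutive_elements(v) for (k, v) in indices_by_row.items()
--     }
--
--     return simplified_indices
-- ===== SOURCE B (Python) =====
-- def get_digit_coordinates_by_row(indicies):
--     result = {}
--     prev = {}
--     for row, col in sorted(indicies, key=lambda x: x[0]):
--         if row not in result:
--             result[row] = [col]
--         elif prev[row] + 1 != col:
--             result[row].append(col)
--         prev[row] = col
--     return result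
-- ===== Notes on version B (the rewrite author's own statement) =====
-- stated objective: alternative
-- what changed: Replaces A's three-stage pipeline (sort, itertools.groupby into a dict, then a per-row index-comprehension filter) by a single fold over the sorted list that maintains a result dict and a per-row previous-column dict, deciding keep/drop online.
import Mathlib
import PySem

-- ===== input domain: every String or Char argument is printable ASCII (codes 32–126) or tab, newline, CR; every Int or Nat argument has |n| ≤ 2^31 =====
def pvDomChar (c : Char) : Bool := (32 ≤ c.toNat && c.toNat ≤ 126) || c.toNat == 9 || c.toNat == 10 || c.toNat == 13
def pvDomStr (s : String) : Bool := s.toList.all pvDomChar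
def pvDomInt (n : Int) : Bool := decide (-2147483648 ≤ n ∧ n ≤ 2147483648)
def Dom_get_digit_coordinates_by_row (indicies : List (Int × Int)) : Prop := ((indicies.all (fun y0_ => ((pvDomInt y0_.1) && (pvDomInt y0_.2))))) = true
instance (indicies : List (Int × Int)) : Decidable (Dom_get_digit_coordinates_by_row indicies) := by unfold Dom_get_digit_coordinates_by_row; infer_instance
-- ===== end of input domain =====

-- B rebuilds the result in ONE pass over the row-sorted list with a running `prev` per row,
-- instead of A's group-then-filter two-stage pipeline; same return value (alternative decomposition).

-- ===== PORT A =====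
-- itertools.groupby over the row-sorted list: consecutive runs of equal first components
def pvGroups : List (Int × Int) → List (Int × List Int)
  | [] => []
  | (r, c) :: rest =>
      (r, c :: (rest.takeWhile (fun p => p.1 == r)).map Prod.snd)
        :: pvGroups (rest.dropWhile (fun p => p.1 == r))
  termination_by l => l.length
  decreasing_by
    simp only [List.length_cons]
    exact Nat.lt_succ_of_le (List.Sublist.length_le (List.dropWhile_sublist _))

def group_indices_by_row (indices : List (Int × Int)) : PySem.Dict Int (List Int) :=
  (pvGroups (PySem.List.sorted indices (fun x => x.1) false)).foldl
    (fun d kv => d.insert kv.1 kv.2) PySem.Dict.empty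

-- [integer_list[0]] + [integer_list[i+1] for i in range(len(integer_list)-1) if ...]
-- integer_list[0] raises IndexError on []; A only applies this to nonempty group lists,
-- where `l.take 1 = [l[0]]` and `getD i 0` with i in range is exactly Python's l[i].
def remove_consecutive_elements (integer_list : List Int) : List Int :=
  integer_list.take 1 ++
    (List.range (integer_list.length - 1)).filterMap (fun i =>
      if integer_list.getD i 0 + 1 ≠ integer_list.getD (i + 1) 0
      then some (integer_list.getD (i + 1) 0) else none)

def get_digit_coordinates_by_row (indicies : List (Int × Int)) : List (Int × List Int) :=
  ((group_indices_by_row indicies).items.foldl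
    (fun d kv => d.insert kv.1 (remove_consecutive_elements kv.2)) PySem.Dict.empty).items

-- ===== PORT B =====
-- loop body: result/prev dicts; `prev[row]` is only read when row ∈ result, where the
-- invariant guarantees row ∈ prev, so the getD default 0 is never the value used.
def pvStepB (st : PySem.Dict Int (List Int) × PySem.Dict Int Int) (rc : Int × Int) :
    PySem.Dict Int (List Int) × PySem.Dict Int Int :=
  let result :=
    match st.1.get? rc.1 with
    | none => st.1.insert rc.1 [rc.2]
    | some cs =>
        if st.2.getD rc.1 0 + 1 ≠ rc.2 then st.1.insert rc.1 (cs ++ [rc.2]) else st.1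
  (result, st.2.insert rc.1 rc.2)

def get_digit_coordinates_by_row_alt (indicies : List (Int × Int)) : List (Int × List Int) :=
  ((PySem.List.sorted indicies (fun x => x.1) false).foldl pvStepB
    (PySem.Dict.empty, PySem.Dict.empty)).1.items

-- ===== PRECONDITION & SPEC =====
def Spec_get_digit_coordinates_by_row (indicies : List (Int × Int)) (out : List (Int × List Int)) : Prop := out = get_digit_coordinates_by_row_alt indicies
instance (indicies : List (Int × Int)) (out : List (Int × List Int)) : Decidable (Spec_get_digit_coordinates_by_row indicies out) := by unfold Spec_get_digit_coordinates_by_row; infer_instance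

-- ===== CLAIM (what is proved, stated in full; the proofs are below) =====
def Claim_equal_get_digit_coordinates_by_row : Prop := ∀ (indicies : List (Int × Int)), Dom_get_digit_coordinates_by_row indicies → Spec_get_digit_coordinates_by_row indicies (get_digit_coordinates_by_row indicies)

-- ===== LEMMAS AND PROOFS =====

def pvTail (p : Int) : List Int → List Int
  | [] => []
  | x :: xs => (if p + 1 ≠ x then [x] else []) ++ pvTail x xs

theorem rcce_aux (cs : List Int) : ∀ c : Int,
  (List.range cs.length).filterMap (fun i =>
    if (c :: cs).getD i 0 + 1 ≠ (c :: cs).getD (i+1) 0 then some ((c :: cs).getD (i+1) 0) else none)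
  = pvTail c cs := by
  induction cs with
  | nil => intro c; simp [pvTail]
  | cons x xs ih =>
    intro c
    rw [List.length_cons, List.range_succ_eq_map, List.filterMap_cons, List.filterMap_map]
    simp only [List.getD_cons_zero, List.getD_cons_succ, Function.comp_def, pvTail]
    have ih' := ih x
    simp only [List.getD_cons_succ] at ih'
    rw [ih']
    split_ifs <;> rfl

theorem rcce_cons (c : Int) (cs : List Int) :
    remove_consecutive_elements (c :: cs) = c :: pvTail c cs := by
  unfold remove_consecutive_elements
  rw [List.length_cons, Nat.add_sub_cancel, rcce_aux]
  rfl

theorem foldB_run (cols : List Int) (r : Int) : ∀ (cs : List Int) (p : Int)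
    (result : PySem.Dict Int (List Int)) (prev : PySem.Dict Int Int),
    (cols.map (fun c => (r, c))).foldl pvStepB (result.insert r cs, prev.insert r p)
      = (result.insert r (cs ++ pvTail p cols), prev.insert r (cols.getLastD p)) := by
  induction cols with
  | nil => intro cs p result prev; simp [pvTail]
  | cons x xs ih =>
    intro cs p result prev
    rw [List.map_cons, List.foldl_cons]
    show (xs.map (fun c => (r, c))).foldl pvStepB (pvStepB (result.insert r cs, prev.insert r p) (r, x)) = _
    have hstep : pvStepB (result.insert r cs, prev.insert r p) (r, x)
        = (result.insert r (cs ++ (if p + 1 ≠ x then [x] else [])), prev.insert r x) := by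
      simp only [pvStepB, PySem.Dict.get?_insert_self, PySem.Dict.getD_insert_self,
        PySem.Dict.insert_insert_self]
      split_ifs <;> simp
    rw [hstep, ih]
    refine Prod.ext (by simp [pvTail]) ?_
    cases xs with
    | nil => simp
    | cons h t =>
      obtain ⟨y, hy⟩ := Option.isSome_iff_exists.mp (List.getLast?_isSome.mpr (List.cons_ne_nil h t))
      simp [hy]

theorem pvGroups_mem_key : ∀ (s : List (Int × Int)) (g : Int × List Int),
    g ∈ pvGroups s → ∃ x ∈ s, x.1 = g.1 := by
  intro s
  induction s using pvGroups.induct with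
  | case1 => intro g hg; simp [pvGroups] at hg
  | case2 r c rest ih =>
    intro g hg
    rw [pvGroups] at hg
    rcases List.mem_cons.mp hg with h | h
    · exact ⟨(r, c), List.mem_cons_self, by rw [h]⟩
    · obtain ⟨x, hx, hxe⟩ := ih g h
      exact ⟨x, List.mem_cons_of_mem _ ((List.dropWhile_sublist _).subset hx), hxe⟩

theorem drop_key_gt (r : Int) (c : Int) (rest : List (Int × Int))
    (hpw : ((r, c) :: rest).Pairwise (fun a b => a.1 ≤ b.1)) :
    ∀ x ∈ rest.dropWhile (fun p => p.1 == r), r < x.1 := by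
  have h1 : ∀ y ∈ rest, r ≤ y.1 := fun y hy => (List.pairwise_cons.mp hpw).1 y hy
  have h2 : (rest.dropWhile (fun p => p.1 == r)).Pairwise (fun a b => a.1 ≤ b.1) :=
    List.Pairwise.sublist (List.dropWhile_sublist _) (List.pairwise_cons.mp hpw).2
  cases hd : rest.dropWhile (fun p => p.1 == r) with
  | nil => simp
  | cons d t =>
    have hdr : (d.1 == r) = false := by
      have h := List.head_dropWhile_not (fun p => p.1 == r) (l := rest) (by rw [hd]; simp)
      simpa [hd] using h
    have hdmem : d ∈ rest := (List.dropWhile_sublist _).subset (hd ▸ List.mem_cons_self)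
    have hne : d.1 ≠ r := by simpa using hdr
    have hrd : r < d.1 := lt_of_le_of_ne (h1 d hdmem) (Ne.symm hne)
    intro x hx
    rcases List.mem_cons.mp hx with h | h
    · exact h ▸ hrd
    · rw [hd] at h2
      exact lt_of_lt_of_le hrd ((List.pairwise_cons.mp h2).1 x h)

theorem foldB_groups : ∀ (s : List (Int × Int)),
    s.Pairwise (fun a b => a.1 ≤ b.1) →
    ∀ (result : PySem.Dict Int (List Int)) (prev : PySem.Dict Int Int),
      (∀ x ∈ s, result.contains x.1 = false) →
      (s.foldl pvStepB (result, prev)).1.items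
        = result.items ++ (pvGroups s).map (fun kv => (kv.1, remove_consecutive_elements kv.2)) := by
  intro s
  induction s using pvGroups.induct with
  | case1 => intro _ result prev _; simp [pvGroups]
  | case2 r c rest ih =>
    intro hpw result prev hfresh
    have hcr : result.contains r = false := hfresh (r, c) List.mem_cons_self
    have hget : result.get? r = none := (PySem.Dict.get?_eq_none_iff_contains result r).mpr hcr
    rw [List.foldl_cons]
    have hstep : pvStepB (result, prev) (r, c) = (result.insert r [c], prev.insert r c) := by
      simp [pvStepB, hget]
    rw [hstep]
    have hsplit : rest = rest.takeWhile (fun p => p.1 == r) ++ rest.dropWhile (fun p => p.1 == r) :=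
      (List.takeWhile_append_dropWhile).symm
    rw [hsplit, List.foldl_append]
    set run := rest.takeWhile (fun p => p.1 == r) with hrun
    set rest' := rest.dropWhile (fun p => p.1 == r) with hrest'
    have hrunshape : run = (run.map Prod.snd).map (fun c => (r, c)) := by
      rw [List.map_map]
      conv_lhs => rw [← List.map_id run]
      refine List.map_congr_left ?_
      intro p hp
      have := List.mem_takeWhile_imp hp
      have : p.1 = r := by simpa using this
      simp [Function.comp, ← this]
    rw [show run.foldl pvStepB (result.insert r [c], prev.insert r c)
          = ((run.map Prod.snd).map (fun c => (r, c))).foldl pvStepB (result.insert r [c], prev.insert r c)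
        from by rw [← hrunshape]]
    rw [foldB_run]
    have hgt : ∀ x ∈ rest', r < x.1 := drop_key_gt r c rest hpw
    have hrestsub : ∀ x ∈ rest', x ∈ (r, c) :: rest := fun x hx =>
      List.mem_cons_of_mem _ ((List.dropWhile_sublist _).subset hx)
    have hpw' : rest'.Pairwise (fun a b => a.1 ≤ b.1) :=
      List.Pairwise.sublist (List.dropWhile_sublist _) (List.pairwise_cons.mp hpw).2
    rw [ih hpw' _ (prev.insert r (((run.map Prod.snd)).getLastD c))
      (by
        intro x hx
        rw [PySem.Dict.contains_insert]
        have hxr : (x.1 == r) = false := by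
          have := hgt x hx; simp; omega
        rw [hxr, Bool.false_or]
        exact hfresh x (hrestsub x hx))]
    rw [PySem.Dict.items_insert_of_not_contains _ _ hcr]
    rw [pvGroups]
    rw [← hsplit]
    simp only [List.map_cons, ← hrun, ← hrest']
    rw [rcce_cons, List.append_assoc]
    rfl

theorem pvGroups_keys_nodup : ∀ (s : List (Int × Int)),
    s.Pairwise (fun a b => a.1 ≤ b.1) → ((pvGroups s).map Prod.fst).Nodup := by
  intro s
  induction s using pvGroups.induct with
  | case1 => intro _; simp [pvGroups]
  | case2 r c rest ih =>
    intro hpw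
    rw [pvGroups, List.map_cons, List.nodup_cons]
    have hgt := drop_key_gt r c rest hpw
    have hpw' : (rest.dropWhile (fun p => p.1 == r)).Pairwise (fun a b => a.1 ≤ b.1) :=
      List.Pairwise.sublist (List.dropWhile_sublist _) (List.pairwise_cons.mp hpw).2
    refine ⟨?_, ih hpw'⟩
    intro hmem
    obtain ⟨g, hg, hgr⟩ := List.mem_map.mp hmem
    obtain ⟨x, hx, hxg⟩ := pvGroups_mem_key _ g hg
    have := hgt x hx
    omega

-- ===== VERDICT (by name: the statement is the Claim_ definition above) =====
theorem get_digit_coordinates_by_row_spec : Claim_equal_get_digit_coordinates_by_row := by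
  intro indicies _
  unfold Spec_get_digit_coordinates_by_row get_digit_coordinates_by_row
    get_digit_coordinates_by_row_alt group_indices_by_row
  set s := PySem.List.sorted indicies (fun x => x.1) false with hs
  have hpw : s.Pairwise (fun a b => a.1 ≤ b.1) := PySem.List.sorted_pairwise indicies _
  have hnd : ((pvGroups s).map Prod.fst).Nodup := pvGroups_keys_nodup s hpw
  have h1 : ((pvGroups s).foldl (fun d kv => d.insert kv.1 kv.2) PySem.Dict.empty).items
      = pvGroups s := by
    have := PySem.Dict.items_foldl_insert_fresh (l := pvGroups s) (k := Prod.fst)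
      (v := Prod.snd) (d := PySem.Dict.empty)
      (by intro a _; exact PySem.Dict.contains_empty _) hnd
    simpa using this
  rw [h1]
  have h2 : ((pvGroups s).foldl
      (fun d kv => d.insert kv.1 (remove_consecutive_elements kv.2)) PySem.Dict.empty).items
      = (pvGroups s).map (fun kv => (kv.1, remove_consecutive_elements kv.2)) := by
    have := PySem.Dict.items_foldl_insert_fresh (l := pvGroups s) (k := Prod.fst)
      (v := fun kv => remove_consecutive_elements kv.2) (d := PySem.Dict.empty)
      (by intro a _; exact PySem.Dict.contains_empty _) hnd
    simpa using this
  rw [h2, foldB_groups s hpw _ _ (by intro x _; exact PySem.Dict.contains_empty _)]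
  simp [PySem.Dict.empty]
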